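-- pv_equiv track=rewrite | github.com/RohanMiraje/DSAwithPython | DSA/string/find_first_left_most_repeat_char.py | left_most_index
-- ===== SOURCE A (Python) =====
-- def left_most_index(string):
--     first_index = [-1 for _ in range(256)]
--     for i, letter in enumerate(string):
--         ascii_index = ord(letter)
--         if first_index[ascii_index] == -1:
--             first_index[ascii_index] = i
--         elif first_index[ascii_index] != -1:
--             return first_index[ascii_index]
--     return None
-- ===== SOURCE B (Python) =====
-- def left_most_index(string):
--     pairs = [(string.index(ch, string.index(ch) + 1), string.index(ch))
--              for ch in set(string)
--              if string.count(ch) > 1]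
--     return min(pairs)[1] if pairs else None
-- ===== Notes on version B (the rewrite author's own statement) =====
-- stated objective: alternative
-- what changed: Replaces A's single left-to-right scan with a 256-entry first-occurrence table by a staged computation: for every distinct character occurring at least twice, build the pair (second-occurrence index, first-occurrence index) with str.index/str.count, then return the second component of the lexicographic minimum (the minimum is unique, so the set's iteration order is immaterial).
import Mathlib
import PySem

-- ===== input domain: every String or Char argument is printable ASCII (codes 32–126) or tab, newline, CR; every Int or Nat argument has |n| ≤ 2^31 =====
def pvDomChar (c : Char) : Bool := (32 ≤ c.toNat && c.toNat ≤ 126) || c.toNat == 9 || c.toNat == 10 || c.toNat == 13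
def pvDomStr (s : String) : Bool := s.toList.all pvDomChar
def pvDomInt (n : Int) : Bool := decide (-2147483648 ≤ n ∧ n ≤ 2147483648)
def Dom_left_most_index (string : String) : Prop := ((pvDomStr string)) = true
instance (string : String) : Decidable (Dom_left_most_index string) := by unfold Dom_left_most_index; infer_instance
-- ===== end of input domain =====

-- B replaces A's left-to-right scan with a 256-entry first-occurrence table by a staged
-- computation: for every distinct character occurring twice, the pair (second-occurrence
-- index, first-occurrence index), then the lexicographic minimum (objective: alternative).

-- ===== PORT A =====
-- loop of A: state is the mutable table first_index and the running index i.
-- List indexing first_index[ascii_index] is ported as getD; exact on Dom, where ord letter < 256.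
def lmiGoA : List Char → Nat → List Int → Option Int
  | [], _, _ => none
  | c :: rest, i, tbl =>
    if tbl.getD c.toNat (-1) = -1 then
      lmiGoA rest (i + 1) (tbl.set c.toNat (i : Int))
    else
      some (tbl.getD c.toNat (-1))

def left_most_index (string : String) : Option Int :=
  lmiGoA string.toList 0 (List.replicate 256 (-1))

-- ===== PORT B =====
-- the comprehension: for ch in set(string), keep (string.index(ch, string.index(ch)+1), string.index(ch))
-- when string.count(ch) > 1.  Hand port of str.index/str.count over toList (exact: string.index(ch) is
-- idxOf as ch occurs, and string.index(ch, k) = k + idxOf in the drop, the char occurring there since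
-- count > 1); the result of min() does not depend on the set's iteration order because the pairs'
-- first components are pairwise distinct.
def lmiPairs (cs : List Char) : List (Int × Int) :=
  (PySem.Set.ofList cs).filterMap (fun c =>
    if 1 < cs.count c then
      some ((((cs.idxOf c + 1) + (cs.drop (cs.idxOf c + 1)).idxOf c : Nat) : Int),
            ((cs.idxOf c : Nat) : Int))
    else none)

-- min(pairs)[1] if pairs else None; Python's tuple min is lexicographic = min2?
def left_most_index_alt (string : String) : Option Int :=
  match PySem.List.min2? (lmiPairs string.toList) Prod.fst Prod.snd with
  | none => none
  | some p => some p.2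

-- ===== PRECONDITION & SPEC =====
def Spec_left_most_index (string : String) (out : Option Int) : Prop := out = left_most_index_alt string
instance (string : String) (out : Option Int) : Decidable (Spec_left_most_index string out) := by unfold Spec_left_most_index; infer_instance

-- ===== CLAIM (what is proved, stated in full; the proofs are below) =====
def Claim_equal_left_most_index : Prop := ∀ (string : String), Dom_left_most_index string → Spec_left_most_index string (left_most_index string)

-- ===== LEMMAS AND PROOFS =====
theorem char_toNat_inj {c d : Char} (h : c.toNat = d.toNat) : c = d := by
  apply Char.ext; exact UInt32.toNat_inj.mp h

-- proof-side bridge: A's table loop as a prefix scan (pre = the characters already seen)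
def lmiScan : List Char → List Char → Option Int
  | [], _ => none
  | c :: rest, pre =>
    if c ∈ pre then some ((pre.idxOf c : Nat) : Int)
    else lmiScan rest (pre ++ [c])

-- invariant: the table holds, for each char code, the first-occurrence index in pre (or -1)
theorem lmiGo_eq : ∀ (cs pre : List Char) (tbl : List Int),
    tbl.length = 256 →
    (∀ c ∈ cs, c.toNat < 256) →
    (∀ c : Char, c.toNat < 256 →
      tbl.getD c.toNat (-1) = if c ∈ pre then ((pre.idxOf c : Nat) : Int) else -1) →
    lmiGoA cs pre.length tbl = lmiScan cs pre := by
  intro cs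
  induction cs with
  | nil => intro _ _ _ _ _; rfl
  | cons c rest ih =>
    intro pre tbl hlen hcs htbl
    have hc : c.toNat < 256 := hcs c (by simp)
    have h := htbl c hc
    by_cases hm : c ∈ pre
    · rw [if_pos hm] at h
      simp only [lmiGoA, lmiScan, h, if_pos hm]
      have : ((pre.idxOf c : Nat) : Int) ≠ -1 := by omega
      rw [if_neg this]
    · rw [if_neg hm] at h
      simp only [lmiGoA, lmiScan, h, if_neg hm]
      have hlen' : (tbl.set c.toNat (pre.length : Int)).length = 256 := by
        rw [List.length_set]; exact hlen
      have : pre.length + 1 = (pre ++ [c]).length := by simp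
      rw [this]
      apply ih (pre ++ [c]) _ hlen' (fun d hd => hcs d (by simp [hd]))
      intro d hd
      have hdlt : d.toNat < tbl.length := by omega
      have hdlt' : d.toNat < (tbl.set c.toNat (pre.length : Int)).length := by
        rw [List.length_set]; exact hdlt
      rw [List.getD_eq_getElem _ _ hdlt']
      by_cases hdc : d = c
      · subst hdc
        rw [List.getElem_set_self]
        have : d ∈ pre ++ [d] := by simp
        rw [if_pos this, List.idxOf_append_of_notMem hm]
        simp
      · have hne : d.toNat ≠ c.toNat := fun h => hdc (char_toNat_inj h)
        rw [List.getElem_set_ne (Ne.symm hne)]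
        have : tbl.getD d.toNat (-1) = tbl[d.toNat] := List.getD_eq_getElem _ _ (by omega)
        rw [← this, htbl d hd]
        by_cases hdp : d ∈ pre
        · rw [if_pos hdp, if_pos (by simp [hdp]), List.idxOf_append_of_mem hdp]
        · rw [if_neg hdp, if_neg (by simp [hdp, hdc])]


theorem idxOf_le_of_getElem : ∀ (l : List Char) (j : Nat) (hj : j < l.length) (d : Char), l[j] = d → l.idxOf d ≤ j := by
  intro l
  induction l with
  | nil => intro j hj; simp at hj
  | cons c t ih =>
    intro j hj d hgd
    by_cases hcd : c = d
    · subst hcd; simp [List.idxOf_cons_self]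
    · cases j with
      | zero => simp at hgd; exact absurd hgd hcd
      | succ j =>
        rw [List.idxOf_cons_ne _ (by exact hcd)]
        have := ih j (by simpa using hj) d (by simpa using hgd)
        omega

theorem count_take_succ_idxOf (l : List Char) (d : Char) (hd : d ∈ l) :
    (l.take (l.idxOf d + 1)).count d = 1 := by
  have hi : l.idxOf d < l.length := List.idxOf_lt_length_of_mem hd
  have h0 : (l.take (l.idxOf d)).count d = 0 := by
    rw [List.count_eq_zero]
    intro hmem
    rw [List.mem_take_iff_getElem] at hmem
    obtain ⟨j, hj, hgd⟩ := hmem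
    have := idxOf_le_of_getElem l j (by omega) d hgd
    omega
  rw [List.take_add_one, List.count_append, h0]
  simp [List.getElem?_eq_getElem hi, List.getElem_idxOf hi]

theorem count_split_idxOf (l : List Char) (d : Char) (hd : d ∈ l) :
    l.count d = 1 + (l.drop (l.idxOf d + 1)).count d := by
  conv_lhs => rw [← List.take_append_drop (l.idxOf d + 1) l]
  rw [List.count_append, count_take_succ_idxOf l d hd]

theorem mem_drop_of_one_lt_count (l : List Char) (d : Char) (h2 : 1 < l.count d) :
    d ∈ l.drop (l.idxOf d + 1) := by
  have hd : d ∈ l := List.count_pos_iff.mp (by omega)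
  have := count_split_idxOf l d hd
  have : 0 < (l.drop (l.idxOf d + 1)).count d := by omega
  exact List.count_pos_iff.mp this

def m2step (acc : Option (Int × Int)) (x : Int × Int) : Option (Int × Int) :=
  match acc with
  | none => some x
  | some m => if (decide (x.1 < m.1) || !decide (m.1 < x.1) && decide (x.2 < m.2)) = true
              then some x else some m

theorem min2?_eq_foldl (l : List (Int × Int)) :
    PySem.List.min2? l Prod.fst Prod.snd = List.foldl m2step none l := by
  unfold PySem.List.min2? m2step
  congr 1
  funext acc x
  cases acc <;> rfl

theorem min2_aux (p : Int × Int) : ∀ (l : List (Int × Int)) (acc : Option (Int × Int)),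
    (∀ q ∈ l, q = p ∨ p.1 < q.1) →
    (acc = some p ∨ ((acc = none ∨ ∃ m, acc = some m ∧ p.1 < m.1) ∧ p ∈ l)) →
    List.foldl m2step acc l = some p := by
  intro l
  induction l with
  | nil =>
    intro acc h hacc
    rcases hacc with h1 | ⟨_, hmem⟩
    · simpa using h1
    · simp at hmem
  | cons x t ih =>
    intro acc h hacc
    rw [List.foldl_cons]
    apply ih _ (fun q hq => h q (by simp [hq]))
    rcases hacc with h1 | ⟨hk, hmem⟩
    · subst h1
      rcases h x (by simp) with hx | hx
      · subst hx; left; simp [m2step]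
      · left; simp [m2step, not_lt_of_gt hx, hx]
    · have hmt : p ∈ t ∨ x = p := by
        rcases List.mem_cons.mp hmem with h' | h'
        · right; exact h'.symm
        · left; exact h'
      rcases hk with hnone | ⟨m, hm, hpm⟩
      · subst hnone
        rcases hmt with hpt | hxp
        · rcases h x (by simp) with hx | hx
          · subst hx; left; rfl
          · right; exact ⟨Or.inr ⟨x, rfl, hx⟩, hpt⟩
        · subst hxp; left; rfl
      · subst hm
        rcases h x (by simp) with hx | hx
        · subst hx; left; simp [m2step, hpm]
        · rcases hmt with hpt | hxp
          · right
            refine ⟨Or.inr ?_, hpt⟩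
            simp only [m2step]
            by_cases hc : (decide (x.1 < m.1) || !decide (m.1 < x.1) && decide (x.2 < m.2)) = true
            · rw [if_pos hc]; exact ⟨x, rfl, hx⟩
            · rw [if_neg hc]; exact ⟨m, rfl, hpm⟩
          · exact absurd hxp.symm (by intro he; subst he; exact lt_irrefl _ hx)

theorem min2?_eq_of_strict_min (l : List (Int × Int)) (p : Int × Int) (hp : p ∈ l)
    (h : ∀ q ∈ l, q = p ∨ p.1 < q.1) :
    PySem.List.min2? l Prod.fst Prod.snd = some p := by
  rw [min2?_eq_foldl]
  exact min2_aux p l none h (Or.inr ⟨Or.inl rfl, hp⟩)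

theorem lmiPairs_nil_of_nodup (l : List Char) (h : l.Nodup) : lmiPairs l = [] := by
  unfold lmiPairs
  rw [List.filterMap_eq_nil_iff]
  intro c _
  have := List.nodup_iff_count_le_one.mp h c
  rw [if_neg (by omega)]

-- in pre ++ c :: rest with pre duplicate-free and c ∈ pre, the pair generated for c
theorem pair_of_head (pre : List Char) (c : Char) (rest : List Char)
    (hnd : pre.Nodup) (hm : c ∈ pre) :
    (pre ++ c :: rest).idxOf c = pre.idxOf c ∧
    ((pre ++ c :: rest).idxOf c + 1) + ((pre ++ c :: rest).drop ((pre ++ c :: rest).idxOf c + 1)).idxOf c = pre.length ∧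
    1 < (pre ++ c :: rest).count c := by
  have hi : pre.idxOf c < pre.length := List.idxOf_lt_length_of_mem hm
  have h1 : (pre ++ c :: rest).idxOf c = pre.idxOf c := List.idxOf_append_of_mem hm
  refine ⟨h1, ?_, ?_⟩
  · rw [h1, List.drop_append_of_le_length (by omega)]
    have hnotin : c ∉ pre.drop (pre.idxOf c + 1) := by
      have hcnt := count_split_idxOf pre c hm
      have := List.nodup_iff_count_le_one.mp hnd c
      have : (pre.drop (pre.idxOf c + 1)).count c = 0 := by omega
      exact (List.count_eq_zero).mp this
    rw [List.idxOf_append_of_notMem hnotin]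
    simp [List.idxOf_cons_self]
    omega
  · rw [List.count_append]
    have : 0 < pre.count c := List.count_pos_iff.mpr hm
    simp [List.count_cons_self]
    omega

-- any other repeated character's second occurrence lies strictly beyond pre
theorem second_gt (pre : List Char) (c : Char) (rest : List Char)
    (hnd : pre.Nodup) (d : Char) (hdc : d ≠ c)
    (h2 : 1 < (pre ++ c :: rest).count d) :
    pre.length < ((pre ++ c :: rest).idxOf d + 1) + ((pre ++ c :: rest).drop ((pre ++ c :: rest).idxOf d + 1)).idxOf d := by
  set l := pre ++ c :: rest with hl
  have hd : d ∈ l := List.count_pos_iff.mp (by omega)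
  have hi : l.idxOf d < l.length := List.idxOf_lt_length_of_mem hd
  have hmd : d ∈ l.drop (l.idxOf d + 1) := mem_drop_of_one_lt_count l d h2
  have hjs : (l.drop (l.idxOf d + 1)).idxOf d < (l.drop (l.idxOf d + 1)).length :=
    List.idxOf_lt_length_of_mem hmd
  set i := l.idxOf d
  set js := (l.drop (i + 1)).idxOf d
  have hlen : (l.drop (i + 1)).length = l.length - (i + 1) := List.length_drop
  have hs_lt : i + 1 + js < l.length := by omega
  have gs : l[i + 1 + js]'hs_lt = d := by
    have h1 : (l.drop (i + 1))[js]'hjs = l[i + 1 + js]'hs_lt := List.getElem_drop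
    have h2' : (l.drop (i + 1))[js]'hjs = d := List.getElem_idxOf hjs
    rw [← h1, h2']
  have hLlt : pre.length < l.length := by
    rw [hl]; simp
  have gL : l[pre.length]'hLlt = c := by
    have h := List.getElem_append_right (as := pre) (bs := c :: rest) (i := pre.length) (le_refl _) (h₂ := hLlt)
    have h2 : (c :: rest)[pre.length - pre.length]'(by simp) = c := by simp
    exact h.trans h2
  have hne : i + 1 + js ≠ pre.length := by
    intro he
    apply hdc
    have hidx : l[i + 1 + js]'hs_lt = l[pre.length]'hLlt := by
      congr 1
    rw [gs, gL] at hidx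
    exact hidx
  by_contra hcon
  push Not at hcon
  have hslt : i + 1 + js < pre.length := by omega
  have hipre : i < pre.length := by omega
  have gi : l[i]'hi = d := List.getElem_idxOf hi
  have e1 : l[i]'hi = pre[i]'hipre := List.getElem_append_left hipre
  have e2 : l[i + 1 + js]'hs_lt = pre[i + 1 + js]'hslt := List.getElem_append_left hslt
  have : i = i + 1 + js := by
    apply (hnd.getElem_inj_iff).mp
    rw [← e1, ← e2, gi, gs]
  omega

theorem scan_eq_min : ∀ (cs pre : List Char), pre.Nodup →
    lmiScan cs pre = (match PySem.List.min2? (lmiPairs (pre ++ cs)) Prod.fst Prod.snd with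
                      | none => none | some p => some p.2) := by
  intro cs
  induction cs with
  | nil =>
    intro pre hnd
    rw [List.append_nil, lmiPairs_nil_of_nodup pre hnd]
    rfl
  | cons c rest ih =>
    intro pre hnd
    by_cases hm : c ∈ pre
    · simp only [lmiScan, if_pos hm]
      obtain ⟨h1, h2, h3⟩ := pair_of_head pre c rest hnd hm
      have hkey : PySem.List.min2? (lmiPairs (pre ++ c :: rest)) Prod.fst Prod.snd
          = some (((pre.length : Nat) : Int), ((pre.idxOf c : Nat) : Int)) := by
        apply min2?_eq_of_strict_min
        · unfold lmiPairs
          rw [List.mem_filterMap]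
          refine ⟨c, ?_, ?_⟩
          · rw [PySem.Set.mem_ofList]; simp
          · rw [if_pos h3, h2, h1]
        · intro q hq
          unfold lmiPairs at hq
          rw [List.mem_filterMap] at hq
          obtain ⟨d, _, hfd⟩ := hq
          by_cases hcnt : 1 < (pre ++ c :: rest).count d
          · rw [if_pos hcnt, Option.some_inj] at hfd
            by_cases hdc : d = c
            · subst hdc
              left
              rw [← hfd, h2, h1]
            · right
              rw [← hfd]
              have := second_gt pre c rest hnd d hdc hcnt
              simp only []
              exact_mod_cast this
          · rw [if_neg hcnt] at hfd
            exact absurd hfd (by simp)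
      rw [hkey]
    · simp only [lmiScan, if_neg hm]
      rw [ih (pre ++ [c]) (by simp [List.nodup_append, hnd]; intro a ha he; exact hm (he ▸ ha))]
      simp only [List.append_assoc, List.singleton_append]

-- ===== VERDICT (by name: the statement is the Claim_ definition above) =====
theorem left_most_index_spec : Claim_equal_left_most_index := by
  intro s hdom
  unfold Spec_left_most_index left_most_index left_most_index_alt
  have hcs : ∀ c ∈ s.toList, c.toNat < 256 := by
    intro c hc
    have := (List.all_eq_true.mp hdom) c hc
    simp only [pvDomChar, Bool.or_eq_true, Bool.and_eq_true, decide_eq_true_eq, beq_iff_eq] at this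
    omega
  have hlen : (List.replicate 256 (-1 : Int)).length = 256 := List.length_replicate
  have h1 : lmiGoA s.toList 0 (List.replicate 256 (-1)) = lmiScan s.toList [] := by
    have := lmiGo_eq s.toList [] (List.replicate 256 (-1)) hlen hcs ?_
    · exact this
    · intro c hc
      rw [List.getD_eq_getElem _ _ (by rw [hlen]; exact hc), List.getElem_replicate]
      simp
  rw [h1, scan_eq_min s.toList [] List.nodup_nil]
  simp
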